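-- pv_equiv track=rewrite | github.com/Alberto200420/UDG | baseDatos-class/CardGame/computerAlgoridm.py | retornadDibujo
-- ===== SOURCE A (Python) =====
-- def retornadDibujo(cartas):
--   # Diccionario para almacenar los 'id' correspondientes a cada 'dibujo'
--   diccionario_resultado = {}
--
--   for carta in cartas:
--     dibujo_actual = carta['dibujo']
--     id_actual = carta['id']
--
--     # Si el 'dibujo' no está en el diccionario, se agrega con una lista que contiene el 'id'
--     if dibujo_actual not in diccionario_resultado:
--       diccionario_resultado[dibujo_actual] = [id_actual]
--     else:
--       # Si el 'dibujo' ya está en el diccionario, se agrega el 'id' a la lista existente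
--       diccionario_resultado[dibujo_actual].append(id_actual)
--   for dibujo, lista_id in diccionario_resultado.items():
--     diccionario_resultado[dibujo] = sorted(lista_id)
--
--   return diccionario_resultado
-- ===== SOURCE B (Python) =====
-- def retornadDibujo(cartas):
--   # Alternative: one pass; each group's id list is kept sorted by inserting every
--   # id at its position, so no per-group sorted() pass is needed at the end.
--   resultado = {}
--   for carta in cartas:
--     lista = resultado.setdefault(carta['dibujo'], [])
--     id_actual = carta['id']
--     i = 0
--     while i < len(lista) and lista[i] <= id_actual:
--       i += 1
--     lista.insert(i, id_actual)
--   return resultado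
-- ===== Notes on version B (the rewrite author's own statement) =====
-- stated objective: alternative
-- what changed: A collects ids per dibujo by appending and then re-sorts every group in a second pass; B does a single pass that keeps each group sorted by inserting every id at its position (no sorted() call, no second pass).
import Mathlib
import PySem

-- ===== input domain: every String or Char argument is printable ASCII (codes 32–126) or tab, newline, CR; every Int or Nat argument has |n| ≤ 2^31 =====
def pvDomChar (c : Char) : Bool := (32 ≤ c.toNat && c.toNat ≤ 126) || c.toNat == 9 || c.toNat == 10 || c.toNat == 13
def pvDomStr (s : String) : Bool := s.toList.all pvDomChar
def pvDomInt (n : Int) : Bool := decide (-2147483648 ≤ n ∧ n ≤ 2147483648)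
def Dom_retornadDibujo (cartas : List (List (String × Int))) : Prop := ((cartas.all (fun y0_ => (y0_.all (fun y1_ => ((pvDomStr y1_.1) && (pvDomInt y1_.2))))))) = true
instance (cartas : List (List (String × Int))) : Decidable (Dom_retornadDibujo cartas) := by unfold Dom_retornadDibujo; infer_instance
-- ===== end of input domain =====

-- B replaces A's append-then-re-sort-each-group second pass with a single pass that keeps
-- every group's id list sorted by positional insertion (objective: alternative decomposition).


-- ===== PORT A =====
-- carta[k] on the association-list card: first match (none = KeyError, excluded by Pre_)
def cardGet? (carta : List (String × Int)) (k : String) : Option Int :=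
  match carta with
  | [] => none
  | (k', v) :: rest => if k' == k then some v else cardGet? rest k

def retornadDibujo (cartas : List (List (String × Int))) : List (Int × List Int) :=
  -- first loop: group the ids by dibujo, appending
  let d := cartas.foldl (fun d carta =>
    match cardGet? carta "dibujo", cardGet? carta "id" with
    | some dib, some idv =>
        if d.contains dib then d.modify dib [] (fun l => l ++ [idv])
        else d.insert dib [idv]
    | _, _ => d) PySem.Dict.empty
  -- second loop: re-assign each key with its sorted list
  (d.items.foldl (fun d2 p => d2.insert p.1 (PySem.List.sorted p.2 (fun v => v) false)) d).items

-- ===== PORT B =====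
-- B's carta[k]: first match (none = KeyError, excluded by Pre_)
def cardGetB? (carta : List (String × Int)) (k : String) : Option Int :=
  match carta with
  | [] => none
  | (k', v) :: rest => if k' == k then some v else cardGetB? rest k

-- the while loop: first index i (from 0 upward) with not (i < len lista ∧ lista[i] ≤ x)
def insPos (lista : List Int) (x : Int) (i : Nat) : Nat :=
  if h : i < lista.length then
    if lista[i] ≤ x then insPos lista x (i + 1) else i
  else i
termination_by lista.length - i
decreasing_by omega

def retornadDibujo_alt (cartas : List (List (String × Int))) : List (Int × List Int) :=
  (cartas.foldl (fun d carta =>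
    match cardGetB? carta "dibujo" with
    | none => d
    | some dib =>
      match cardGetB? carta "id" with
      | none => d
      | some idv =>
        let lista := d.getD dib []            -- resultado.setdefault(...); the insert below writes the updated list back
        let i := insPos lista idv 0
        d.insert dib (lista.take i ++ idv :: lista.drop i)  -- lista.insert(i, idv) with 0 ≤ i ≤ len(lista): exact
    ) PySem.Dict.empty).items

-- ===== PRECONDITION & SPEC =====
-- Pre_ excludes exactly the cards lacking a 'dibujo' or 'id' key, where Python A raises KeyError.
def Pre_retornadDibujo (cartas : List (List (String × Int))) : Prop :=
  ∀ carta ∈ cartas, "dibujo" ∈ carta.map Prod.fst ∧ "id" ∈ carta.map Prod.fst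
instance (cartas : List (List (String × Int))) : Decidable (Pre_retornadDibujo cartas) := by unfold Pre_retornadDibujo; infer_instance

def pvWitness_retornadDibujo : (List (List (String × Int))) :=
  [[("dibujo", 1), ("id", 7)], [("dibujo", 1), ("id", 3)], [("dibujo", 2), ("id", 5)]]

def Spec_retornadDibujo (cartas : List (List (String × Int))) (out : List (Int × List Int)) : Prop := out = retornadDibujo_alt cartas
instance (cartas : List (List (String × Int))) (out : List (Int × List Int)) : Decidable (Spec_retornadDibujo cartas out) := by unfold Spec_retornadDibujo; infer_instance

-- ===== CLAIM (what is proved, stated in full; the proofs are below) =====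
def Claim_equal_retornadDibujo : Prop := ∀ (cartas : List (List (String × Int))), Dom_retornadDibujo cartas → Pre_retornadDibujo cartas → Spec_retornadDibujo cartas (retornadDibujo cartas)

-- ===== LEMMAS AND PROOFS =====

-- sortVal applies A's per-group sorting to one (dibujo, ids) item
def sortVal (p : Int × List Int) : Int × List Int := (p.1, PySem.List.sorted p.2 (fun v => v) false)

lemma insPos_spec (x : Int) (s : List Int) : ∀ n i, s.length - i ≤ n → i ≤ s.length →
    i ≤ insPos s x i ∧ insPos s x i ≤ s.length ∧
    (∀ j (hj : j < s.length), i ≤ j → j < insPos s x i → s[j] ≤ x) ∧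
    (∀ h : insPos s x i < s.length, x < s[insPos s x i]) := by
  intro n
  induction n with
  | zero =>
      intro i h1 h2
      have hi : i = s.length := by omega
      subst hi
      rw [insPos]
      simp only [lt_irrefl, dite_false]
      refine ⟨le_refl _, le_refl _, by omega, fun h => h.elim⟩
  | succ n ih =>
      intro i h1 h2
      rw [insPos]
      by_cases hlt : i < s.length
      · simp only [hlt, dite_true]
        by_cases hle : s[i] ≤ x
        · simp only [hle, if_true]
          obtain ⟨a, b, c, d⟩ := ih (i + 1) (by omega) (by omega)
          refine ⟨by omega, b, ?_, d⟩
          intro j hj hij hlt2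
          rcases Nat.eq_or_lt_of_le hij with rfl | h
          · exact hle
          · exact c j hj (by omega) hlt2
        · simp only [hle, if_false]
          refine ⟨le_refl _, by omega, by omega, fun h => ?_⟩
          · have : s[i]'hlt = s[i]'h := rfl
            omega
      · simp only [hlt, dite_false]
        refine ⟨le_refl _, by omega, by omega, fun h => h.elim⟩

lemma sorted_append_singleton (l : List Int) (x : Int) :
    PySem.List.sorted (l ++ [x]) (fun v => v) false =
      (PySem.List.sorted l (fun v => v) false).take (insPos (PySem.List.sorted l (fun v => v) false) x 0)
      ++ x :: (PySem.List.sorted l (fun v => v) false).drop (insPos (PySem.List.sorted l (fun v => v) false) x 0) := by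
  set s := PySem.List.sorted l (fun v => v) false with hs
  obtain ⟨h0, hlen, hpre, hpost⟩ := insPos_spec x s s.length 0 (by omega) (Nat.zero_le _)
  set p := insPos s x 0 with hp
  have hsp : s.Pairwise (fun a b => a ≤ b) := PySem.List.sorted_pairwise l (fun v => v)
  have hperm : (s.take p ++ x :: s.drop p).Perm (l ++ [x]) := by
    have h1 : (s.take p ++ x :: s.drop p).Perm (x :: (s.take p ++ s.drop p)) := List.perm_middle
    rw [List.take_append_drop] at h1
    exact h1.trans (((PySem.List.sorted_perm l (fun v => v) false).cons x).trans
      (List.perm_append_singleton x l).symm)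
  have hget : ∀ i j (hi : i < s.length) (hj : j < s.length), i ≤ j → s[i] ≤ s[j] := by
    intro i j hi hj hij
    rcases Nat.eq_or_lt_of_le hij with rfl | h
    · exact le_refl _
    · exact List.pairwise_iff_getElem.mp hsp i j hi hj h
  have htake : ∀ a ∈ s.take p, a ≤ x := by
    intro a ha
    rw [List.mem_take_iff_getElem] at ha
    obtain ⟨i, hi, rfl⟩ := ha
    exact hpre i (by omega) (Nat.zero_le _) (by omega)
  have hdrop : ∀ b ∈ s.drop p, x ≤ b := by
    intro b hb
    rw [List.mem_drop_iff_getElem] at hb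
    obtain ⟨i, hi, rfl⟩ := hb
    have h1 : x < s[p]'(by omega) := hpost (by omega)
    have h2 : s[p]'(by omega) ≤ s[p + i] := hget p (p + i) (by omega) (by omega) (by omega)
    omega
  have hpw : (s.take p ++ x :: s.drop p).Pairwise (fun a b => a ≤ b) := by
    rw [List.pairwise_append]
    refine ⟨hsp.sublist (List.take_sublist _ _), ?_, ?_⟩
    · rw [List.pairwise_cons]
      exact ⟨hdrop, hsp.sublist (List.drop_sublist _ _)⟩
    · intro a ha b hb
      rcases List.mem_cons.mp hb with rfl | hb'
      · exact htake a ha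
      · exact le_trans (htake a ha) (hdrop b hb')
  exact PySem.List.sorted_id_eq_of_perm_of_pairwise (l ++ [x]) _ hperm hpw

lemma val_unique (d : PySem.Dict Int (List Int)) (hnd : d.keys.Nodup) {k : Int} {v w : List Int}
    (h1 : (k, v) ∈ d.items) (h2 : (k, w) ∈ d.items) : v = w := by
  have a1 := PySem.Dict.get?_of_mem_items d h1 hnd
  have a2 := PySem.Dict.get?_of_mem_items d h2 hnd
  rw [a1] at a2
  exact Option.some.inj a2

lemma keys_eq_of_rel (dA dB : PySem.Dict Int (List Int)) (hrel : dB.items = dA.items.map sortVal) :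
    dB.keys = dA.keys := by
  simp only [PySem.Dict.keys, hrel, List.map_map]
  rfl

lemma cardGetB_eq (carta : List (String × Int)) (k : String) :
    cardGetB? carta k = cardGet? carta k := by
  induction carta with
  | nil => rfl
  | cons p rest ih => simp only [cardGetB?, cardGet?, ih]

lemma step_rel (dA dB : PySem.Dict Int (List Int)) (carta : List (String × Int))
    (hnd : dA.keys.Nodup) (hrel : dB.items = dA.items.map sortVal) :
    ((match cardGet? carta "dibujo", cardGet? carta "id" with
      | some dib, some idv =>
          if dA.contains dib then dA.modify dib [] (fun l => l ++ [idv])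
          else dA.insert dib [idv]
      | _, _ => dA) : PySem.Dict Int (List Int)).keys.Nodup ∧
    ((match cardGetB? carta "dibujo" with
      | none => dB
      | some dib =>
        match cardGetB? carta "id" with
        | none => dB
        | some idv =>
          let lista := dB.getD dib []
          let i := insPos lista idv 0
          dB.insert dib (lista.take i ++ idv :: lista.drop i)) : PySem.Dict Int (List Int)).items =
    ((match cardGet? carta "dibujo", cardGet? carta "id" with
      | some dib, some idv =>
          if dA.contains dib then dA.modify dib [] (fun l => l ++ [idv])
          else dA.insert dib [idv]
      | _, _ => dA) : PySem.Dict Int (List Int)).items.map sortVal := by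
  rcases h1 : cardGet? carta "dibujo" with _ | dib
  · simp only [cardGetB_eq, h1]
    exact ⟨hnd, hrel⟩
  rcases h2 : cardGet? carta "id" with _ | idv
  · simp only [cardGetB_eq, h1, h2]
    exact ⟨hnd, hrel⟩
  simp only [cardGetB_eq, h1, h2]
  have hkeys := keys_eq_of_rel dA dB hrel
  have hndB : dB.keys.Nodup := hkeys ▸ hnd
  have hcont : dB.contains dib = dA.contains dib := by
    rw [PySem.Dict.contains_eq_decide_mem_keys, PySem.Dict.contains_eq_decide_mem_keys, hkeys]
  by_cases hc : dA.contains dib = true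
  · -- existing key
    obtain ⟨q, hq, hq1⟩ : ∃ q ∈ dA.items, q.1 = dib := by
      have hmem : dib ∈ dA.keys := (PySem.Dict.contains_iff_mem_keys dA dib).mp hc
      simpa only [PySem.Dict.keys, List.mem_map] using hmem
    have hqmem : (dib, q.2) ∈ dA.items := by rwa [← hq1]
    have hgA : dA.getD dib [] = q.2 := PySem.Dict.getD_of_mem_items dA hqmem hnd []
    have hmemB : (dib, PySem.List.sorted q.2 (fun v => v) false) ∈ dB.items := by
      rw [hrel]
      exact List.mem_map.mpr ⟨(dib, q.2), hqmem, rfl⟩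
    have hgB : dB.getD dib [] = PySem.List.sorted q.2 (fun v => v) false :=
      PySem.Dict.getD_of_mem_items dB hmemB hndB []
    have hcB : dB.contains dib = true := hcont.trans hc
    simp only [hc, if_true, PySem.Dict.modify]
    refine ⟨PySem.Dict.nodup_keys_insert dA dib _ hnd, ?_⟩
    rw [PySem.Dict.items_insert_of_contains dA _ hc, PySem.Dict.items_insert_of_contains dB _ hcB,
      hrel, List.map_map, List.map_map]
    refine List.map_congr_left ?_
    intro r hr
    by_cases hrd : r.1 = dib
    · have hrv : r.2 = q.2 := val_unique dA hnd (by rwa [← hrd]) hqmem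
      simp only [Function.comp_apply, sortVal, hrd, beq_self_eq_true, if_true, hgA, hgB, hrv]
      rw [← sorted_append_singleton q.2 idv]
    · simp only [Function.comp_apply, sortVal]
      have hbf : (r.1 == dib) = false := beq_eq_false_iff_ne.mpr hrd
      simp only [hbf, Bool.false_eq_true, if_false]
  · -- fresh key
    have hc' : dA.contains dib = false := by simpa using hc
    have hcB : dB.contains dib = false := hcont.trans hc'
    have hgB : dB.getD dib [] = [] := PySem.Dict.getD_of_not_contains dB [] hcB
    simp only [hc', if_false, Bool.false_eq_true]
    refine ⟨PySem.Dict.nodup_keys_insert dA dib _ hnd, ?_⟩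
    have hval : (dB.getD dib []).take (insPos (dB.getD dib []) idv 0) ++
        idv :: (dB.getD dib []).drop (insPos (dB.getD dib []) idv 0) = [idv] := by
      rw [hgB]
      rw [insPos]
      simp
    rw [PySem.Dict.items_insert_of_not_contains dA _ hc',
      PySem.Dict.items_insert_of_not_contains dB _ hcB, hrel, List.map_append, hval]
    rfl


lemma fold_rel (cartas : List (List (String × Int))) : ∀ (dA dB : PySem.Dict Int (List Int)),
    dA.keys.Nodup → dB.items = dA.items.map sortVal →
    (cartas.foldl (fun d carta =>
      match cardGet? carta "dibujo", cardGet? carta "id" with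
      | some dib, some idv =>
          if d.contains dib then d.modify dib [] (fun l => l ++ [idv])
          else d.insert dib [idv]
      | _, _ => d) dA).keys.Nodup ∧
    (cartas.foldl (fun d carta =>
      match cardGetB? carta "dibujo" with
      | none => d
      | some dib =>
        match cardGetB? carta "id" with
        | none => d
        | some idv =>
          let lista := d.getD dib []
          let i := insPos lista idv 0
          d.insert dib (lista.take i ++ idv :: lista.drop i)) dB).items =
    (cartas.foldl (fun d carta =>
      match cardGet? carta "dibujo", cardGet? carta "id" with
      | some dib, some idv =>
          if d.contains dib then d.modify dib [] (fun l => l ++ [idv])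
          else d.insert dib [idv]
      | _, _ => d) dA).items.map sortVal := by
  induction cartas with
  | nil => intro dA dB h1 h2; exact ⟨h1, h2⟩
  | cons c rest ih =>
      intro dA dB h1 h2
      have hs := step_rel dA dB c h1 h2
      simpa using ih _ _ hs.1 hs.2

lemma resort_items (L : List (Int × List Int)) : ∀ (d : PySem.Dict Int (List Int)),
    d.keys.Nodup → (∀ p ∈ L, p ∈ d.items) → (L.map Prod.fst).Nodup →
    (L.foldl (fun d2 p => d2.insert p.1 (PySem.List.sorted p.2 (fun v => v) false)) d).items =
      d.items.map (fun q => if q.1 ∈ L.map Prod.fst then sortVal q else q) := by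
  induction L with
  | nil => intro d _ _ _; simp
  | cons p rest ih =>
      intro d hnd hmem hLnd
      simp only [List.map_cons, List.nodup_cons] at hLnd
      have hp : p ∈ d.items := hmem p List.mem_cons_self
      have hpk : d.contains p.1 = true := by
        rw [PySem.Dict.contains_eq_decide_mem_keys]
        simp only [PySem.Dict.keys, decide_eq_true_eq]
        exact List.mem_map.mpr ⟨p, hp, rfl⟩
      have hd' := PySem.Dict.items_insert_of_contains d (PySem.List.sorted p.2 (fun v => v) false) hpk
      set d' := d.insert p.1 (PySem.List.sorted p.2 (fun v => v) false) with hd'def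
      have hnd' : d'.keys.Nodup := PySem.Dict.nodup_keys_insert d p.1 _ hnd
      have hmem' : ∀ r ∈ rest, r ∈ d'.items := by
        intro r hr
        have hrk : r.1 ≠ p.1 := by
          intro he
          exact hLnd.1 (he ▸ List.mem_map.mpr ⟨r, hr, rfl⟩)
        rw [hd']
        refine List.mem_map.mpr ⟨r, hmem r (List.mem_cons_of_mem _ hr), ?_⟩
        simp [beq_eq_false_iff_ne.mpr hrk]
      rw [List.foldl_cons, ih d' hnd' hmem' hLnd.2, hd', List.map_map]
      refine List.map_congr_left ?_
      intro q hq
      by_cases hqp : q.1 = p.1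
      · have hqv : q.2 = p.2 := val_unique d hnd (by rw [← hqp]; exact hq) hp
        simp only [Function.comp_apply, beq_iff_eq, hqp, if_true, hLnd.1, List.mem_cons]
        have hnotrest : p.1 ∉ rest.map Prod.fst := hLnd.1
        simp only [List.map_cons, List.mem_cons, hnotrest, or_false, if_false, sortVal, hqv]
        simp [hqp]
      · have hbf : (q.1 == p.1) = false := beq_eq_false_iff_ne.mpr hqp
        simp only [Function.comp_apply, hbf, Bool.false_eq_true, if_false]
        simp only [List.map_cons, List.mem_cons, hqp, false_or]


-- ===== VERDICT (by name: the statement is the Claim_ definition above) =====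
theorem retornadDibujo_spec : Claim_equal_retornadDibujo := by
  intro cartas _ _
  unfold Spec_retornadDibujo retornadDibujo retornadDibujo_alt
  obtain ⟨hnd, hitems⟩ := fold_rel cartas PySem.Dict.empty PySem.Dict.empty
    PySem.Dict.nodup_keys_empty (by rfl)
  simp only
  rw [hitems]
  rw [resort_items _ _ hnd (fun p hp => hp) (by simpa only [PySem.Dict.keys] using hnd)]
  refine List.map_congr_left ?_
  intro q hq
  rw [if_pos (List.mem_map.mpr ⟨q, hq, rfl⟩)]
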